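-- pv_equiv track=rewrite | github.com/maxned/Bot-the-Builder | Max's Test Files/marine_builder.py | find_valid_locations
-- ===== SOURCE A (Python) =====
-- def find_valid_locations(grid, height, width):
--     seen = set()
--     check = [(0, 0, 0, 0)]
--     w = width
--     h = height
--     items = list()
--     while check:
--         x, y, ox, oy = check.pop()
--         if (x, y) in seen:
--             continue
--         seen.add((x, y))
--         if x + w >= len(grid) or y + h >= len(grid[0]):
--             continue
--         for i, row in enumerate(grid[x+ox:x+w+1], x+ox):
--             for j, val in enumerate(row[y+oy:y+h+1], y+oy):
--                 if val:
--                     break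
--             else:
--                 continue
--             check.extend([(i+1, y, 0, 0), (x, j+1, 0, 0)])
--             break
--         else:
--             items.append((x,y))
--             #yield (x, y)
--             check.extend([(x+1, y, w-1, 0), (x, y+1, 0, h-1)])
--             continue
--     return items
-- ===== SOURCE B (Python) =====
-- def _col_window(start, stop, n):
--     # effective [lo, hi) index window of row[start:stop] (step 1), Python slice rules
--     lo = n + start if start < 0 else start
--     if lo < 0:
--         lo = 0
--     if lo > n:
--         lo = n
--     hi = n + stop if stop < 0 else stop
--     if hi < 0:
--         hi = 0
--     if hi > n:
--         hi = n
--     return lo, hi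
--
--
-- def _first_ge(cols, lo):
--     # index of the first element >= lo in the sorted list cols (binary search)
--     l, r = 0, len(cols)
--     while l < r:
--         m = (l + r) // 2
--         if cols[m] < lo:
--             l = m + 1
--         else:
--             r = m
--     return l
--
--
-- def find_valid_locations(grid, height, width):
--     if not grid:
--         return []
--     # per row: (row length, increasing list of obstacle columns) -- computed once
--     meta = [(len(row), [j for j, v in enumerate(row) if v]) for row in grid]
--     n = len(grid)
--     ncols = len(grid[0])
--     w = width
--     h = height
--     seen = set()
--     check = [(0, 0, 0, 0)]
--     items = []
--     while check:
--         x, y, ox, oy = check.pop()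
--         if (x, y) in seen:
--             continue
--         seen.add((x, y))
--         if x + w >= n or y + h >= ncols:
--             continue
--         hit = None
--         i = x + ox
--         for ln, cols in meta[x + ox:x + w + 1]:
--             clo, chi = _col_window(y + oy, y + h + 1, ln)
--             k = _first_ge(cols, clo)
--             if k < len(cols) and cols[k] < chi:
--                 hit = (i, (y + oy) + (cols[k] - clo))
--                 break
--             i += 1
--         if hit is None:
--             items.append((x, y))
--             check.extend([(x + 1, y, w - 1, 0), (x, y + 1, 0, h - 1)])
--         else:
--             fi, fj = hit
--             check.extend([(fi + 1, y, 0, 0), (x, fj + 1, 0, 0)])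
--     return items
-- ===== Notes on version B (the rewrite author's own statement) =====
-- stated objective: alternative
-- what changed: B keeps A's exact DFS over candidate positions but precomputes, once, each row's sorted list of obstacle columns and locates the first obstacle of every examined window by binary search over that index, instead of A's cell-by-cell rescan of the window at every DFS state; it trades A's per-state window scans for a one-off index plus logarithmic lookups, which wins on sparse grids but adds constant overhead on dense ones.
import Mathlib
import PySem

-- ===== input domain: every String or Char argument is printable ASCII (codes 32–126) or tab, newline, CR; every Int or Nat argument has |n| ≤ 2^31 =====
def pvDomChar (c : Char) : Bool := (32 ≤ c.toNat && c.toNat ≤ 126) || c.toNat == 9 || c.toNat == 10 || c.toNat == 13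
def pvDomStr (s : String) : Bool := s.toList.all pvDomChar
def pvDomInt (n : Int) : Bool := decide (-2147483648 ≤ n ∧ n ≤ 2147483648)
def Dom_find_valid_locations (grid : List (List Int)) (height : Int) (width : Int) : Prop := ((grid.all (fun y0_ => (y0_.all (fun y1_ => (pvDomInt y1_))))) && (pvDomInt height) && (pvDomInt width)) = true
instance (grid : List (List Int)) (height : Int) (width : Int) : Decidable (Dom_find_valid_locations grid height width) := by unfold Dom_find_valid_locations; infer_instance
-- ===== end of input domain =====

-- B keeps A's exact DFS order but builds per-row obstacle-column lists once and finds the first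
-- obstacle of each window by binary search over that index instead of rescanning the window cell
-- by cell. Both loops carry a fuel counter (a pure totality guard; the same expression on both sides).

-- ===== PORT A =====
-- inner 'for j, val in enumerate(row[...], y+oy): if val: break / else: continue'
def pvScanRowA : List Int → Int → Option Int
  | [], _ => none
  | v :: t, j => if v ≠ 0 then some j else pvScanRowA t (j + 1)

-- outer 'for i, row in enumerate(grid[...], x+ox): ... break / else: ...'
def pvScanRowsA (y oy h : Int) : List (List Int) → Int → Option (Int × Int)
  | [], _ => none
  | row :: t, i =>
    match pvScanRowA (PySem.List.slice row (some (y + oy)) (some (y + h + 1))) (y + oy) with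
    | some j => some (i, j)
    | none => pvScanRowsA y oy h t (i + 1)

-- fuel for the while-loops: strictly more iterations than either loop can make (totality guard only)
def pvFuel (grid : List (List Int)) (height width : Int) : Nat :=
  16 * (grid.length + width.natAbs + 2) * ((grid.head?.getD []).length + height.natAbs + 2)

-- 'while check: ...' of A
def pvLoopA (grid : List (List Int)) (n m w h : Int) :
    Nat → List (Int × Int × Int × Int) → PySem.Set (Int × Int) → List (Int × Int) → List (Int × Int)
  | 0, _, _, items => items
  | _ + 1, [], _, items => items
  | fuel + 1, (x, y, ox, oy) :: rest, seen, items =>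
    if (x, y) ∈ seen then pvLoopA grid n m w h fuel rest seen items
    else
      let seen' := PySem.Set.add seen (x, y)
      if x + w ≥ n ∨ y + h ≥ m then pvLoopA grid n m w h fuel rest seen' items
      else
        match pvScanRowsA y oy h (PySem.List.slice grid (some (x + ox)) (some (x + w + 1))) (x + ox) with
        | some (i, j) =>
            pvLoopA grid n m w h fuel ((x, j + 1, 0, 0) :: (i + 1, y, 0, 0) :: rest) seen' items
        | none =>
            pvLoopA grid n m w h fuel ((x, y + 1, 0, h - 1) :: (x + 1, y, w - 1, 0) :: rest) seen'
              (items ++ [(x, y)])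

def find_valid_locations (grid : List (List Int)) (height : Int) (width : Int) : List (Int × Int) :=
  -- 'len(grid[0])': IndexError on grid = [] when the 'or' forces its evaluation (width < 0);
  -- exactly those inputs are excluded by Pre_ below
  let n : Int := grid.length
  let m : Int := ((PySem.List.pyGet? grid 0).getD []).length
  pvLoopA grid n m width height (pvFuel grid height width) [(0, 0, 0, 0)] PySem.Set.empty []

-- ===== PORT B =====
-- _col_window: Python step-1 slice index arithmetic
def pvColWindow (start stop n : Int) : Int × Int :=
  let lo := if start < 0 then n + start else start
  let lo := if lo < 0 then 0 else lo
  let lo := if lo > n then n else lo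
  let hi := if stop < 0 then n + stop else stop
  let hi := if hi < 0 then 0 else hi
  let hi := if hi > n then n else hi
  (lo, hi)

-- _first_ge: hand-rolled binary search of Source B (A's module imports nothing, so B imports nothing);
-- the counter d only bounds the recursion (each step halves r - l, so d = r - l always suffices)
def pvFirstGeAux (cols : List Int) (lo : Int) : Nat → Nat → Nat → Nat
  | 0, l, _ => l
  | d + 1, l, r =>
    if l < r then
      let m := (l + r) / 2
      if cols.getD m 0 < lo then pvFirstGeAux cols lo d (m + 1) r
      else pvFirstGeAux cols lo d l m
    else l

def pvFirstGe (cols : List Int) (lo : Int) (l r : Nat) : Nat :=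
  pvFirstGeAux cols lo (r - l) l r

-- '[j for j, v in enumerate(row) if v]'
def pvObsCols : List Int → Int → List Int
  | [], _ => []
  | v :: t, j => if v ≠ 0 then j :: pvObsCols t (j + 1) else pvObsCols t (j + 1)

-- 'meta = [(len(row), [...]) for row in grid]'
def pvMeta (grid : List (List Int)) : List (Int × List Int) :=
  grid.map (fun row => ((row.length : Int), pvObsCols row 0))

-- 'for ln, cols in meta[x+ox:x+w+1]: ...' with the running label i
def pvScanMetaB (y oy h : Int) : List (Int × List Int) → Int → Option (Int × Int)
  | [], _ => none
  | (ln, cols) :: t, i =>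
    let p := pvColWindow (y + oy) (y + h + 1) ln
    let k := pvFirstGe cols p.1 0 cols.length
    if k < cols.length ∧ cols.getD k 0 < p.2 then
      some (i, (y + oy) + (cols.getD k 0 - p.1))
    else pvScanMetaB y oy h t (i + 1)

-- 'while check: ...' of B
def pvLoopB (mt : List (Int × List Int)) (n m w h : Int) :
    Nat → List (Int × Int × Int × Int) → PySem.Set (Int × Int) → List (Int × Int) → List (Int × Int)
  | 0, _, _, items => items
  | _ + 1, [], _, items => items
  | fuel + 1, (x, y, ox, oy) :: rest, seen, items =>
    if (x, y) ∈ seen then pvLoopB mt n m w h fuel rest seen items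
    else
      let seen' := PySem.Set.add seen (x, y)
      if x + w ≥ n ∨ y + h ≥ m then pvLoopB mt n m w h fuel rest seen' items
      else
        match pvScanMetaB y oy h (PySem.List.slice mt (some (x + ox)) (some (x + w + 1))) (x + ox) with
        | some (i, j) =>
            pvLoopB mt n m w h fuel ((x, j + 1, 0, 0) :: (i + 1, y, 0, 0) :: rest) seen' items
        | none =>
            pvLoopB mt n m w h fuel ((x, y + 1, 0, h - 1) :: (x + 1, y, w - 1, 0) :: rest) seen'
              (items ++ [(x, y)])

def find_valid_locations_alt (grid : List (List Int)) (height : Int) (width : Int) : List (Int × Int) :=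
  if grid = [] then []
  else
    pvLoopB (pvMeta grid) grid.length ((grid.head?.getD []).length : Int) width height
      (pvFuel grid height width) [(0, 0, 0, 0)] PySem.Set.empty []

-- ===== PRECONDITION & SPEC =====
-- Pre_ excludes exactly the inputs where A raises: grid = [] with width < 0 makes A evaluate
-- grid[0] (IndexError); everywhere else A returns normally.
def Pre_find_valid_locations (grid : List (List Int)) (height : Int) (width : Int) : Prop :=
  grid ≠ [] ∨ 0 ≤ width
instance (grid : List (List Int)) (height : Int) (width : Int) : Decidable (Pre_find_valid_locations grid height width) := by unfold Pre_find_valid_locations; infer_instance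

def pvWitness_find_valid_locations : List (List Int) × Int × Int := ([[0, 0], [0, 1]], 1, 1)

def Spec_find_valid_locations (grid : List (List Int)) (height : Int) (width : Int) (out : List (Int × Int)) : Prop := out = find_valid_locations_alt grid height width
instance (grid : List (List Int)) (height : Int) (width : Int) (out : List (Int × Int)) : Decidable (Spec_find_valid_locations grid height width out) := by unfold Spec_find_valid_locations; infer_instance

-- ===== CLAIM (what is proved, stated in full; the proofs are below) =====
def Claim_equal_find_valid_locations : Prop := ∀ (grid : List (List Int)) (height : Int) (width : Int), Dom_find_valid_locations grid height width → Pre_find_valid_locations grid height width → Spec_find_valid_locations grid height width (find_valid_locations grid height width)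

-- ===== LEMMAS AND PROOFS =====

theorem pv_find?_congr {α : Type} (l : List α) (p q : α → Bool)
    (h : ∀ x ∈ l, p x = q x) : l.find? p = l.find? q := by
  induction l with
  | nil => rfl
  | cons x t ih =>
    simp only [List.find?_cons]
    rw [h x (by simp)]
    cases q x
    · exact ih (fun y hy => h y (by simp [hy]))
    · rfl

theorem pvObsCols_ge (row : List Int) : ∀ (j : Int), ∀ c ∈ pvObsCols row j, j ≤ c := by
  induction row with
  | nil => intro j c hc; simp [pvObsCols] at hc
  | cons v t ih =>
    intro j c hc
    simp only [pvObsCols] at hc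
    split_ifs at hc with hv
    · rcases List.mem_cons.1 hc with rfl | hc
      · omega
      · have := ih (j + 1) c hc; omega
    · have := ih (j + 1) c hc; omega

theorem map_shift (o : Option Int) (f g : Int → Int) (h : ∀ c, f c = g c) :
    o.map f = o.map g := by cases o <;> simp [h]

theorem pvScanRowA_find (row : List Int) : ∀ (a b : Nat) (j s : Int),
    pvScanRowA ((row.drop a).take (b - a)) s =
      ((pvObsCols row j).find? (fun c => decide (j + (a : Int) ≤ c ∧ c < j + (b : Int)))).map
        (fun c => s + (c - (j + (a : Int)))) := by
  induction row with
  | nil => intro a b j s; simp [pvScanRowA, pvObsCols]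
  | cons v t ih =>
    intro a b j s
    cases a with
    | zero =>
      cases b with
      | zero =>
        simp only [List.drop_zero, Nat.sub_zero, List.take_zero, pvScanRowA]
        rw [List.find?_eq_none.2 (fun c hc => by simp only [decide_eq_true_eq]; push_cast; omega)]
        rfl
      | succ b' =>
        simp only [List.drop_zero, Nat.sub_zero, List.take_succ_cons, pvScanRowA, pvObsCols]
        split_ifs with hv
        · rw [List.find?_cons_of_pos (by simp only [decide_eq_true_eq]; push_cast; omega)]
          simp
        · have heq := ih 0 b' (j + 1) (s + 1)
          simp only [List.drop_zero, Nat.sub_zero] at heq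
          rw [heq, pv_find?_congr _ _ (fun c => decide (j + (0:Nat) ≤ c ∧ c < j + ((Nat.succ b') : Int)))
            (fun c hc => by
              have := pvObsCols_ge t (j + 1) c hc
              simp only [decide_eq_decide]; push_cast; omega)]
          exact map_shift _ _ _ (fun c => by push_cast; ring)
    | succ a' =>
      have hsub : b - (a' + 1) = (b - 1) - a' := by omega
      simp only [List.drop_succ_cons, hsub]
      rw [ih a' (b - 1) (j + 1) s]
      simp only [pvObsCols]
      cases Nat.eq_zero_or_pos b with
      | inl hb0 =>
        subst hb0
        rw [List.find?_eq_none.2 (fun c hc => by simp only [decide_eq_true_eq]; push_cast; omega),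
            List.find?_eq_none.2 (fun c hc => by
              simp only [decide_eq_true_eq]
              split_ifs at hc with hv
              · rcases List.mem_cons.1 hc with rfl | hc
                · push_cast; omega
                · have := pvObsCols_ge t (j + 1) c hc; push_cast; omega
              · have := pvObsCols_ge t (j + 1) c hc; push_cast; omega)]
        rfl
      | inr hb =>
        have hcong : ∀ c, (decide ((j+1) + (a' : Int) ≤ c ∧ c < (j+1) + ((b-1 : Nat) : Int)))
            = (decide (j + ((a'+1 : Nat) : Int) ≤ c ∧ c < j + (b : Int))) := fun c => by
          simp only [decide_eq_decide]; push_cast [Nat.cast_sub hb]; omega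
        split_ifs with hv
        · rw [List.find?_cons_of_neg (by simp only [decide_eq_true_eq]; push_cast; omega)]
          rw [pv_find?_congr _ _ _ (fun c _ => hcong c)]
          exact map_shift _ _ _ (fun c => by push_cast; ring)
        · rw [pv_find?_congr _ _ _ (fun c _ => hcong c)]
          exact map_shift _ _ _ (fun c => by push_cast; ring)
theorem pvFirstGeAux_inv (cols : List Int) (lo : Int)
    (hmono : ∀ i j : Nat, i ≤ j → j < cols.length → cols.getD i 0 ≤ cols.getD j 0) :
    ∀ (d l r : Nat), r - l ≤ d → l ≤ r → r ≤ cols.length →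
      (∀ i < l, cols.getD i 0 < lo) → (∀ i, r ≤ i → i < cols.length → lo ≤ cols.getD i 0) →
      l ≤ pvFirstGeAux cols lo d l r ∧ pvFirstGeAux cols lo d l r ≤ r ∧
        (∀ i < pvFirstGeAux cols lo d l r, cols.getD i 0 < lo) ∧
        (pvFirstGeAux cols lo d l r < cols.length → lo ≤ cols.getD (pvFirstGeAux cols lo d l r) 0) := by
  intro d
  induction d with
  | zero =>
    intro l r hd hlr hrlen hl hg
    simp only [pvFirstGeAux]
    exact ⟨le_refl l, hlr, hl, fun hlen => hg l (by omega) hlen⟩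
  | succ d ih =>
    intro l r hd hlr hrlen hl hg
    simp only [pvFirstGeAux]
    split_ifs with hcmp hval
    · have := ih ((l + r) / 2 + 1) r (by omega) (by omega) hrlen
        (fun i hi => by
          rcases Nat.lt_or_ge i l with h' | h'
          · exact hl i h'
          · exact lt_of_le_of_lt (hmono i ((l + r) / 2) (by omega) (by omega)) hval)
        hg
      exact ⟨by omega, this.2.1, this.2.2.1, this.2.2.2⟩
    · have := ih l ((l + r) / 2) (by omega) (by omega) (by omega) hl
        (fun i hi1 hi2 => le_trans (not_lt.1 hval) (hmono ((l + r) / 2) i hi1 hi2))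
      refine ⟨this.1, by omega, this.2.2⟩
    · exact ⟨le_refl l, hlr, hl, fun hlen => hg l (by omega) hlen⟩

theorem pv_pairwise_mono (cols : List Int) (hs : cols.Pairwise (· < ·)) :
    ∀ i j : Nat, i ≤ j → j < cols.length → cols.getD i 0 ≤ cols.getD j 0 := by
  intro i j hij hj
  rcases Nat.eq_or_lt_of_le hij with rfl | hlt
  · exact le_refl _
  · rw [List.getD_eq_getElem _ _ (by omega), List.getD_eq_getElem _ _ hj]
    exact le_of_lt (List.pairwise_iff_getElem.1 hs i j (by omega) hj hlt)

theorem pvFirstGe_spec (cols : List Int) (lo : Int) (hs : cols.Pairwise (· < ·)) :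
    (∀ i < pvFirstGe cols lo 0 cols.length, cols.getD i 0 < lo) ∧
      pvFirstGe cols lo 0 cols.length ≤ cols.length ∧
      (pvFirstGe cols lo 0 cols.length < cols.length →
        lo ≤ cols.getD (pvFirstGe cols lo 0 cols.length) 0) := by
  unfold pvFirstGe
  have := pvFirstGeAux_inv cols lo (pv_pairwise_mono cols hs) (cols.length - 0) 0 cols.length
    (le_refl _) (Nat.zero_le _) (le_refl _) (fun i hi => absurd hi (Nat.not_lt_zero i))
    (fun i hi1 hi2 => absurd (lt_of_le_of_lt hi1 hi2) (lt_irrefl _))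
  exact ⟨this.2.2.1, this.2.1, this.2.2.2⟩

theorem pv_find?_first (cols : List Int) (p : Int → Bool) :
    ∀ (k : Nat), k < cols.length → (∀ i < k, p (cols.getD i 0) = false) →
      p (cols.getD k 0) = true → cols.find? p = some (cols.getD k 0) := by
  induction cols with
  | nil => intro k hk; simp at hk
  | cons c t ih =>
    intro k hk h1 h2
    cases k with
    | zero => simpa using List.find?_cons_of_pos (by simpa using h2)
    | succ k' =>
      rw [List.find?_cons_of_neg (by simpa using h1 0 (Nat.succ_pos _))]
      exact ih k' (by simpa using hk) (fun i hi => h1 (i + 1) (by omega)) h2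

theorem pv_find_sorted (cols : List Int) (lo hi : Int) (hs : cols.Pairwise (· < ·)) :
    cols.find? (fun c => decide (lo ≤ c ∧ c < hi)) =
      (if pvFirstGe cols lo 0 cols.length < cols.length ∧
            cols.getD (pvFirstGe cols lo 0 cols.length) 0 < hi then
        some (cols.getD (pvFirstGe cols lo 0 cols.length) 0)
      else none) := by
  obtain ⟨h1, h2, h3⟩ := pvFirstGe_spec cols lo hs
  set k := pvFirstGe cols lo 0 cols.length with hk
  split_ifs with hcond
  · exact pv_find?_first cols _ k hcond.1
      (fun i hi => by simp only [decide_eq_false_iff_not]; have := h1 i hi; omega)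
      (by simp only [decide_eq_true_eq]; exact ⟨h3 hcond.1, hcond.2⟩)
  · rw [List.find?_eq_none]
    intro c hc
    obtain ⟨i, hilen, rfl⟩ := List.mem_iff_getElem.1 hc
    simp only [decide_eq_true_eq, not_and, not_lt]
    intro hloc
    rcases Nat.lt_or_ge i k with h' | h'
    · have := h1 i h'
      rw [List.getD_eq_getElem _ _ hilen] at this; omega
    · have hklen : k < cols.length := lt_of_le_of_lt h' hilen
      have hge : cols.getD k 0 ≥ hi := by
        rcases not_and_or.1 hcond with h | h
        · exact absurd hklen h
        · omega
      have := pv_pairwise_mono cols hs k i h' hilen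
      rw [List.getD_eq_getElem _ _ hilen] at this
      omega
theorem pv_slice_map {α β : Type} (f : α → β) (xs : List α) (a? b? : Option Int) :
    PySem.List.slice (xs.map f) a? b? = (PySem.List.slice xs a? b?).map f := by
  simp only [PySem.List.slice, List.length_map]
  cases a? <;> cases b? <;> simp [List.map_drop, List.map_take]

theorem pvColWindow_eq (s e : Int) (len : Nat) :
    pvColWindow s e (len : Int) =
      ((PySem.List.clampIdx len s : Int), (PySem.List.clampIdx len e : Int)) := by
  simp only [pvColWindow, PySem.List.clampIdx]
  rw [Prod.mk.injEq]
  constructor <;> (split_ifs <;> omega)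

theorem pvObsCols_sorted (row : List Int) : ∀ (j : Int), (pvObsCols row j).Pairwise (· < ·) := by
  induction row with
  | nil => intro j; simp [pvObsCols]
  | cons v t ih =>
    intro j
    simp only [pvObsCols]
    split_ifs with hv
    · exact List.Pairwise.cons (fun c hc => by have := pvObsCols_ge t (j + 1) c hc; omega) (ih (j + 1))
    · exact ih (j + 1)

theorem pvScan_eq (y oy h : Int) : ∀ (rows : List (List Int)) (i : Int),
    pvScanRowsA y oy h rows i =
      pvScanMetaB y oy h (rows.map fun row => ((row.length : Int), pvObsCols row 0)) i := by
  intro rows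
  induction rows with
  | nil => intro i; rfl
  | cons row t ih =>
    intro i
    simp only [List.map_cons, pvScanRowsA, pvScanMetaB, pvColWindow_eq]
    have hslice : PySem.List.slice row (some (y + oy)) (some (y + h + 1)) =
        (row.drop (PySem.List.clampIdx row.length (y + oy))).take
          (PySem.List.clampIdx row.length (y + h + 1) - PySem.List.clampIdx row.length (y + oy)) := by
      simp [PySem.List.slice]
    rw [hslice, pvScanRowA_find row _ _ 0 (y + oy)]
    simp only [zero_add]
    rw [pv_find_sorted _ _ _ (pvObsCols_sorted row 0)]
    split_ifs with hcond
    · simp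
    · simpa using ih (i + 1)
theorem pvLoopA_nil (grid : List (List Int)) (n m w h : Int) (fuel : Nat) (seen : PySem.Set (Int × Int))
    (items : List (Int × Int)) : pvLoopA grid n m w h fuel [] seen items = items := by
  cases fuel <;> rfl

theorem pvLoop_eq (grid : List (List Int)) (n m w h : Int) :
    ∀ (fuel : Nat) (stack : List (Int × Int × Int × Int)) (seen : PySem.Set (Int × Int))
      (items : List (Int × Int)),
      pvLoopA grid n m w h fuel stack seen items = pvLoopB (pvMeta grid) n m w h fuel stack seen items := by
  intro fuel
  induction fuel with
  | zero => intro stack seen items; rfl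
  | succ f ih =>
    intro stack seen items
    cases stack with
    | nil => rfl
    | cons st rest =>
      obtain ⟨x, y, ox, oy⟩ := st
      simp only [pvLoopA, pvLoopB]
      have hsc : pvScanMetaB y oy h (PySem.List.slice (pvMeta grid) (some (x + ox)) (some (x + w + 1))) (x + ox)
          = pvScanRowsA y oy h (PySem.List.slice grid (some (x + ox)) (some (x + w + 1))) (x + ox) := by
        rw [pvMeta, pv_slice_map, ← pvScan_eq]
      rw [hsc]
      split_ifs with h1 h2
      · exact ih rest seen items
      · exact ih rest _ items
      · cases hx : pvScanRowsA y oy h (PySem.List.slice grid (some (x + ox)) (some (x + w + 1))) (x + ox) with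
        | none => exact ih _ _ _
        | some p => obtain ⟨i, j⟩ := p; exact ih _ _ _

theorem pvFuel_pos (grid : List (List Int)) (height width : Int) :
    ∃ k, pvFuel grid height width = k + 1 := by
  refine ⟨pvFuel grid height width - 1, ?_⟩
  have : pvFuel grid height width ≠ 0 := by
    unfold pvFuel
    simp
  omega


-- ===== VERDICT (by name: the statement is the Claim_ definition above) =====
theorem find_valid_locations_spec : Claim_equal_find_valid_locations := by
  intro grid height width _ hpre
  unfold Spec_find_valid_locations find_valid_locations find_valid_locations_alt
  by_cases hg : grid = []
  · subst hg
    rw [if_pos rfl]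
    rcases hpre with h | h
    · exact absurd rfl h
    obtain ⟨k, hk⟩ := pvFuel_pos [] height width
    rw [hk]
    simp only [pvLoopA]
    rw [if_neg (by simp [PySem.Set.empty]), if_pos (Or.inl (by simpa using h))]
    exact pvLoopA_nil _ _ _ _ _ _ _ _
  · rw [if_neg hg]
    have hm : ((PySem.List.pyGet? grid 0).getD []) = grid.head?.getD [] := by
      rw [PySem.List.pyGet?_zero, List.head?_eq_getElem?]
    rw [hm]
    exact pvLoop_eq grid _ _ width height _ _ _ _
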